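-- pv_equiv track=rewrite | github.com/PranavRaam/New_Patient_Order_Script | AthenaOrders/GetEfaxDetails.py | get_relevant_links
-- ===== SOURCE A (Python) =====
-- def get_relevant_links(efax_no,links):
--     e_links=[]
--     for i, link in enumerate(links):
--         if efax_no in link:
--             for j in range(i + 1, len(links)):
--                 if 'SCANID' not in links[j]:
--                     e_links.append(links[j])
--                 else:
--                     break
--     return e_links
-- ===== SOURCE B (Python) =====
-- def get_relevant_links(efax_no, links):
--     # One right-to-left pass builds nxt[i] = index of the first 'SCANID' link at
--     # or after i (sentinel n); each efax match then takes one slice, no rescanning.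
--     n = len(links)
--     nxt = [n] * (n + 1)
--     for i in range(n - 1, -1, -1):
--         nxt[i] = i if 'SCANID' in links[i] else nxt[i + 1]
--     out = []
--     for i, link in enumerate(links):
--         if efax_no in link:
--             out += links[i + 1:nxt[i + 1]]
--     return out
-- ===== Notes on version B (the rewrite author's own statement) =====
-- stated objective: alternative
-- what changed: Replaces the nested break-loop (rescanning forward from every efax match) with a single right-to-left pass precomputing a next-SCANID index table, then one table lookup plus slice per match.
import Mathlib
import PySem

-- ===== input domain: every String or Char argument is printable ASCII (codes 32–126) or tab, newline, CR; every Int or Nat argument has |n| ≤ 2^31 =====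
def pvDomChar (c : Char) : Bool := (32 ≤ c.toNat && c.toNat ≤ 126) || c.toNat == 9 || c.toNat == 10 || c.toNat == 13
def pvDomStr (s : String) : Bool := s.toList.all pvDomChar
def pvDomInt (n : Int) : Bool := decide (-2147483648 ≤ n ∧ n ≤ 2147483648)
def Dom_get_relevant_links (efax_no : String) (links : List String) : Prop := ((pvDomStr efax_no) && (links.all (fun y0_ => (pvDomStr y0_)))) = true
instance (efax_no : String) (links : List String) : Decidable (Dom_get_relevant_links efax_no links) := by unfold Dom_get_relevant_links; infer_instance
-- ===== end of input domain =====

-- B precomputes a right-to-left next-SCANID index table instead of A's nested forward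
-- break-loop per match (objective: alternative algorithm, index table + slice lookups).

-- ===== PORT A =====
-- inner 'for j in range(i+1, len(links)): … else break' loop, collecting from index j
def pvInnerA (links : List String) (j : Nat) : List String :=
  if h : j < links.length then
    if ¬ (PySem.Str.isIn "SCANID" links[j] = true) then links[j] :: pvInnerA links (j + 1)
    else []
  else []
termination_by links.length - j

def get_relevant_links (efax_no : String) (links : List String) : List String :=
  (PySem.List.enumerate links 0).foldl
    (fun e_links p =>
      if PySem.Str.isIn efax_no p.2 then e_links ++ pvInnerA links (p.1.toNat + 1)
      else e_links)
    []

-- ===== PORT B =====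
-- nxt of Source B built right-to-left: pvNxt i t = [nxt[i], …, nxt[i + |t|]] for the suffix t
-- starting at absolute index i (base entry = the sentinel n)
def pvNxt : Nat → List String → List Nat
  | i, [] => [i]
  | i, l :: t =>
      let rest := pvNxt (i + 1) t
      (if PySem.Str.isIn "SCANID" l then i else rest.headD (i + 1)) :: rest

def get_relevant_links_alt (efax_no : String) (links : List String) : List String :=
  let nxt := pvNxt 0 links
  (PySem.List.enumerate links 0).foldl
    (fun out p =>
      -- nxt[i+1]: the index i+1 is always in range (|nxt| = |links|+1), so getD is exact
      if PySem.Str.isIn efax_no p.2 then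
        out ++ PySem.List.slice links (some (p.1 + 1)) (some ((nxt.getD (p.1.toNat + 1) 0 : Nat) : Int))
      else out)
    []

-- ===== PRECONDITION & SPEC =====
def Spec_get_relevant_links (efax_no : String) (links : List String) (out : List String) : Prop := out = get_relevant_links_alt efax_no links
instance (efax_no : String) (links : List String) (out : List String) : Decidable (Spec_get_relevant_links efax_no links out) := by unfold Spec_get_relevant_links; infer_instance

-- ===== CLAIM (what is proved, stated in full; the proofs are below) =====
def Claim_equal_get_relevant_links : Prop := ∀ (efax_no : String) (links : List String), Dom_get_relevant_links efax_no links → Spec_get_relevant_links efax_no links (get_relevant_links efax_no links)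

-- ===== LEMMAS AND PROOFS =====

-- A's inner break-loop is the take-until-SCANID of the suffix starting at j
theorem pvInnerA_eq_takeWhile (links : List String) (j : Nat) :
    pvInnerA links j = (links.drop j).takeWhile (fun l => !PySem.Str.isIn "SCANID" l) := by
  rw [pvInnerA]
  split
  · next h =>
    rw [List.drop_eq_getElem_cons h, List.takeWhile_cons]
    rw [pvInnerA_eq_takeWhile links (j + 1)]
    simp
  · next h =>
    rw [List.drop_eq_nil_of_le (by omega : links.length ≤ j)]
    simp
termination_by links.length - j

theorem pvNxt_ne_nil (i : Nat) (t : List String) : pvNxt i t ≠ [] := by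
  cases t <;> simp [pvNxt]

-- B's table entry j is j plus the length of the take-until-SCANID of the suffix at j
theorem pvNxt_getD (t : List String) (i j : Nat) (hj : j ≤ t.length) :
    (pvNxt i t).getD j 0 = i + j + ((t.drop j).takeWhile (fun l => !PySem.Str.isIn "SCANID" l)).length := by
  induction t generalizing i j with
  | nil =>
    have h0 : j = 0 := Nat.le_zero.mp hj
    subst h0
    simp [pvNxt]
  | cons l t ih =>
    cases j with
    | zero =>
      have hne := pvNxt_ne_nil (i + 1) t
      have hhd : (pvNxt (i + 1) t).headD (i + 1) = (pvNxt (i + 1) t).getD 0 0 := by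
        cases h : pvNxt (i + 1) t with
        | nil => exact absurd h hne
        | cons a r => rfl
      simp only [pvNxt, List.getD_cons_zero, List.drop_zero, List.takeWhile_cons]
      by_cases hs : PySem.Str.isIn "SCANID" l = true
      · rw [if_pos hs, hs]
        simp
      · have hsf : PySem.Str.isIn "SCANID" l = false := by
          revert hs; cases PySem.Str.isIn "SCANID" l <;> simp
        rw [if_neg hs, hsf, hhd, ih (i + 1) 0 (Nat.zero_le _)]
        simp only [List.drop_zero, Bool.not_false, if_true, List.length_cons]
        omega
    | succ k =>
      have hk : k ≤ t.length := by simpa using hj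
      have hih := ih (i + 1) k hk
      simp only [pvNxt, List.getD_cons_succ, List.drop_succ_cons]
      omega

-- B's slice at a match equals A's inner loop there
theorem pvSlice_eq_innerA (links : List String) (k : Nat) (hk : k < links.length) :
    PySem.List.slice links (some ((k : Int) + 1))
      (some (((pvNxt 0 links).getD (k + 1) 0 : Nat) : Int))
      = pvInnerA links (k + 1) := by
  rw [pvNxt_getD links 0 (k + 1) (by omega), pvInnerA_eq_takeWhile]
  have h1 : ((k : Int) + 1) = ((k + 1 : Nat) : Int) := by push_cast; ring
  set m := ((links.drop (k + 1)).takeWhile (fun l => !PySem.Str.isIn "SCANID" l)).length with hm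
  have h2 : ((0 + (k + 1) + m : Nat) : Int) = ((k + 1 : Nat) : Int) + (m : Int) := by push_cast; ring
  rw [h1, h2, PySem.List.slice_natCast_add]
  exact (List.prefix_iff_eq_take.mp (List.takeWhile_prefix _)).symm

-- ===== VERDICT (by name: the statement is the Claim_ definition above) =====
theorem get_relevant_links_spec : Claim_equal_get_relevant_links := by
  intro efax_no links _
  unfold Spec_get_relevant_links get_relevant_links get_relevant_links_alt
  refine (PySem.List.foldl_congr_mem _ _ _ _ ?_).symm
  intro acc p hp
  obtain ⟨k, hk, rfl⟩ := (PySem.List.mem_enumerate_iff _ _ _).mp hp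
  simp only [Int.zero_add, Int.toNat_natCast]
  rw [pvSlice_eq_innerA links k hk]
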